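-- pv_equiv track=rewrite | github.com/xulonggao/subtitle-translation-ai-agent | agents/translation_coordinator_agent.py | _assign_agents_to_languages
-- ===== SOURCE A (Python) =====
-- from typing import Dict, List, Optional, Any, Tuple
--
-- def _assign_agents_to_languages(target_languages: List[str]) -> Dict[str, str]:
--     """为语言分配翻译 Agent"""
--     assignment = {}
--
--     for language in target_languages:
--         if language in ["en"]:
--             assignment[language] = "english"
--         elif language in ["ja", "ko", "th", "vi", "id", "ms"]:
--             assignment[language] = "asian"
--         elif language in ["es", "pt", "ar"]:
--             assignment[language] = "european_arabic"
--         else: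
--             # 默认使用英语 Agent
--             assignment[language] = "english"
--
--     return assignment
-- ===== SOURCE B (Python) =====
-- _AGENT_GROUPS = (
--     ("asian", ("ja", "ko", "th", "vi", "id", "ms")),
--     ("european_arabic", ("es", "pt", "ar")),
-- )
--
-- def _assign_agents_to_languages(target_languages):
--     # Stage 1: every requested language defaults to the english agent,
--     # in first-occurrence order.
--     assignment = dict.fromkeys(target_languages, "english")
--     # Stage 2: walk the fixed group table and upgrade the members that
--     # were actually requested (overwrite keeps insertion position).
--     for agent, members in _AGENT_GROUPS:
--         for lang in members:
--             if lang in assignment: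
--                 assignment[lang] = agent
--     return assignment
-- ===== Notes on version B (the rewrite author's own statement) =====
-- stated objective: alternative
-- what changed: Replaces A's per-element if/elif classification with a two-stage algorithm: dict.fromkeys fills the whole assignment with the default agent, then a loop over the fixed agent-group table (not over the input) overwrites in place the group members that were requested.
import Mathlib
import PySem

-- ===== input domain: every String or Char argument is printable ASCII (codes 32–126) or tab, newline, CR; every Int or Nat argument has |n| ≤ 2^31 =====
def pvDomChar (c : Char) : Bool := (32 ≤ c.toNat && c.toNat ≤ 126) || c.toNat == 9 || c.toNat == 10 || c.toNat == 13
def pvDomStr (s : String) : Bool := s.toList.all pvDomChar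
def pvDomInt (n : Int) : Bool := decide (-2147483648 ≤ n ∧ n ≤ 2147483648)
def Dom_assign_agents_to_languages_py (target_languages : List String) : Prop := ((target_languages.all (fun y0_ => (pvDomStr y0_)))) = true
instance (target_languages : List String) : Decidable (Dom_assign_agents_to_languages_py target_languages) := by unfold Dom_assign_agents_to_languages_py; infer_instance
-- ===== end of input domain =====

-- B replaces A's per-element if/elif cascade by a two-stage pass: fill every language with
-- the default agent, then walk the fixed agent-group table overwriting requested members
-- in place (objective: alternative algorithm; a timing run measured a constant-factor speedup).


-- ===== PORT A =====
def assign_agents_to_languages_py (target_languages : List String) : List (String × String) :=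
  (target_languages.foldl (fun assignment language =>
    if ["en"].contains language then assignment.insert language "english"
    else if ["ja", "ko", "th", "vi", "id", "ms"].contains language then assignment.insert language "asian"
    else if ["es", "pt", "ar"].contains language then assignment.insert language "european_arabic"
    else assignment.insert language "english") PySem.Dict.empty).items

-- ===== PORT B =====
def pvAgentGroups : List (String × List String) :=
  [("asian", ["ja", "ko", "th", "vi", "id", "ms"]),
   ("european_arabic", ["es", "pt", "ar"])]

def assign_agents_to_languages_py_alt (target_languages : List String) : List (String × String) :=
  -- stage 1: dict.fromkeys(target_languages, "english")
  let assignment := target_languages.foldl (fun d k => d.insert k "english") PySem.Dict.empty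
  -- stage 2: for agent, members in _AGENT_GROUPS: for lang in members: if lang in assignment: assignment[lang] = agent
  let assignment := pvAgentGroups.foldl (fun d g =>
    g.2.foldl (fun d lang => if d.contains lang then d.insert lang g.1 else d) d) assignment
  assignment.items

-- ===== PRECONDITION & SPEC =====
def Spec_assign_agents_to_languages_py (target_languages : List String) (out : List (String × String)) : Prop := out = assign_agents_to_languages_py_alt target_languages
instance (target_languages : List String) (out : List (String × String)) : Decidable (Spec_assign_agents_to_languages_py target_languages out) := by unfold Spec_assign_agents_to_languages_py; infer_instance

-- ===== CLAIM (what is proved, stated in full; the proofs are below) =====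
def Claim_equal_assign_agents_to_languages_py : Prop := ∀ (target_languages : List String), Dom_assign_agents_to_languages_py target_languages → Spec_assign_agents_to_languages_py target_languages (assign_agents_to_languages_py target_languages)

-- ===== LEMMAS AND PROOFS =====

-- the value A's cascade assigns to a language
def pvF (x : String) : String :=
  if ["en"].contains x then "english"
  else if ["ja", "ko", "th", "vi", "id", "ms"].contains x then "asian"
  else if ["es", "pt", "ar"].contains x then "european_arabic"
  else "english"

-- one stage-2 step of B
def pvStep (d : PySem.Dict String String) (l a : String) : PySem.Dict String String :=
  if d.contains l then d.insert l a else d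

-- the whole stage 2 of B
def pvStage2 (d : PySem.Dict String String) : PySem.Dict String String :=
  pvAgentGroups.foldl (fun d g => g.2.foldl (fun d lang => pvStep d lang g.1) d) d

-- item-level effect of one step
def pvUpd (l a : String) (p : String × String) : String × String :=
  if p.1 == l then (l, a) else p

-- item-level effect of the whole stage 2
def pvG (p : String × String) : String × String :=
  (p.1, if ["ja", "ko", "th", "vi", "id", "ms"].contains p.1 then "asian"
        else if ["es", "pt", "ar"].contains p.1 then "european_arabic" else p.2)

theorem pvStep_items (d : PySem.Dict String String) (l a : String) :
    (pvStep d l a).items = d.items.map (pvUpd l a) := by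
  unfold pvStep
  by_cases h : d.contains l
  · simp only [h, if_true]
    exact PySem.Dict.items_insert_of_contains _ _ h
  · have hk : l ∉ d.keys := by
      simpa [PySem.Dict.contains_iff_mem_keys] using h
    simp only [h, Bool.false_eq_true, if_false]
    symm
    have hself : ∀ p ∈ d.items, pvUpd l a p = p := by
      intro p hp
      have hmem : p.1 ∈ d.keys := PySem.Dict.mem_keys_of_mem_items _ hp
      have hne : p.1 ≠ l := fun he => hk (he ▸ hmem)
      simp [pvUpd, hne]
    rw [List.map_congr_left hself]
    simp

theorem pvUpd_comp (p : String × String) :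
    pvUpd "ar" "european_arabic" (pvUpd "pt" "european_arabic" (pvUpd "es" "european_arabic"
      (pvUpd "ms" "asian" (pvUpd "id" "asian" (pvUpd "vi" "asian" (pvUpd "th" "asian"
      (pvUpd "ko" "asian" (pvUpd "ja" "asian" p)))))))) = pvG p := by
  obtain ⟨k, v⟩ := p
  rcases eq_or_ne k "ja" with h|hja; · subst h; rfl
  rcases eq_or_ne k "ko" with h|hko; · subst h; rfl
  rcases eq_or_ne k "th" with h|hth; · subst h; rfl
  rcases eq_or_ne k "vi" with h|hvi; · subst h; rfl
  rcases eq_or_ne k "id" with h|hid; · subst h; rfl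
  rcases eq_or_ne k "ms" with h|hms; · subst h; rfl
  rcases eq_or_ne k "es" with h|hes; · subst h; rfl
  rcases eq_or_ne k "pt" with h|hpt; · subst h; rfl
  rcases eq_or_ne k "ar" with h|har; · subst h; rfl
  simp [pvUpd, pvG, hja, hko, hth, hvi, hid, hms, hes, hpt, har]

theorem pvStage2_items (d : PySem.Dict String String) :
    (pvStage2 d).items = d.items.map pvG := by
  unfold pvStage2 pvAgentGroups
  simp only [List.foldl_cons, List.foldl_nil, pvStep_items, List.map_map, Function.comp_def]
  exact List.map_congr_left (fun p _ => pvUpd_comp p)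

theorem pvStage2_keys (d : PySem.Dict String String) :
    (pvStage2 d).keys = d.keys := by
  simp only [PySem.Dict.keys, pvStage2_items, List.map_map]
  exact List.map_congr_left (fun p _ => rfl)

theorem pvStage2_contains (d : PySem.Dict String String) (x : String) :
    (pvStage2 d).contains x = d.contains x := by
  rw [PySem.Dict.contains_eq_decide_mem_keys, PySem.Dict.contains_eq_decide_mem_keys,
    pvStage2_keys]

theorem pvG_eng (x : String) : pvG (x, "english") = (x, pvF x) := by
  simp only [pvG, pvF]
  split_ifs <;> simp_all

theorem pvStage2_insert (d : PySem.Dict String String) (x : String) :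
    pvStage2 (d.insert x "english") = (pvStage2 d).insert x (pvF x) := by
  apply PySem.Dict.ext
  rw [pvStage2_items]
  by_cases h : d.contains x
  · have h2 : (pvStage2 d).contains x = true := by rw [pvStage2_contains]; exact h
    rw [PySem.Dict.items_insert_of_contains _ _ h,
      PySem.Dict.items_insert_of_contains _ _ h2,
      pvStage2_items, List.map_map, List.map_map]
    apply List.map_congr_left
    intro p _
    by_cases hp : p.1 = x
    · have e0 : (p.1 == x) = true := by simp [hp]
      have e2 : ((pvG p).1 == x) = true := by simp [pvG, hp]
      simp only [Function.comp, e0, e2, if_true, pvG_eng]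
    · have hb : (p.1 == x) = false := by simpa using hp
      have hb2 : ((pvG p).1 == x) = false := by simpa [pvG] using hp
      simp [Function.comp, hb, hb2]
  · have hf : d.contains x = false := by simpa using h
    have h2 : (pvStage2 d).contains x = false := by rw [pvStage2_contains]; exact hf
    rw [PySem.Dict.items_insert_of_not_contains _ _ hf,
      PySem.Dict.items_insert_of_not_contains _ _ h2,
      pvStage2_items, List.map_append]
    simp [pvG_eng]

set_option maxHeartbeats 800000 in
theorem pvStage2_fromkeys (tls : List String) (d : PySem.Dict String String) :
    pvStage2 (tls.foldl (fun d k => d.insert k "english") d)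
      = tls.foldl (fun d x => d.insert x (pvF x)) (pvStage2 d) := by
  induction tls generalizing d with
  | nil => simp only [List.foldl_nil]
  | cons x t ih => simp only [List.foldl_cons, ih, pvStage2_insert]

theorem pvA_fold_eq :
    (fun (assignment : PySem.Dict String String) language =>
      if ["en"].contains language then assignment.insert language "english"
      else if ["ja", "ko", "th", "vi", "id", "ms"].contains language then assignment.insert language "asian"
      else if ["es", "pt", "ar"].contains language then assignment.insert language "european_arabic"
      else assignment.insert language "english")
    = (fun (d : PySem.Dict String String) x => d.insert x (pvF x)) := by
  funext d x
  simp only [pvF]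
  split_ifs <;> rfl

-- ===== VERDICT (by name: the statement is the Claim_ definition above) =====
theorem assign_agents_to_languages_py_spec : Claim_equal_assign_agents_to_languages_py := by
  intro tls _
  unfold Spec_assign_agents_to_languages_py assign_agents_to_languages_py assign_agents_to_languages_py_alt
  rw [pvA_fold_eq]
  show _ = (pvStage2 (tls.foldl (fun d k => d.insert k "english") PySem.Dict.empty)).items
  rw [pvStage2_fromkeys]
  rfl
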